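-- pv_equiv track=rewrite | github.com/cirosantilli/project-euler-solvers | solvers/101.py | tenth_degree_u
-- ===== SOURCE A (Python) =====
-- def tenth_degree_u(n: int) -> int:
--     # u_n = sum_{i=0..10} (-1)^i * n^i
--     total = 0
--     sign = 1
--     p = 1
--     for _i in range(11):
--         total += sign * p
--         sign *= -1
--         p *= n
--     return total
-- ===== SOURCE B (Python) =====
-- def tenth_degree_u(n: int) -> int:
--     # Horner's scheme on x = -n: sum_{i=0..10} (-n)^i
--     x = -n
--     result = 0
--     for _ in range(11):
--         result = result * x + 1
--     return result
-- ===== Notes on version B (the rewrite author's own statement) =====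
-- stated objective: simpler
-- what changed: Replaces the sign/power/total triple-accumulator loop with Horner's scheme on x=-n using a single multiply-add accumulator.
import Mathlib
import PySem

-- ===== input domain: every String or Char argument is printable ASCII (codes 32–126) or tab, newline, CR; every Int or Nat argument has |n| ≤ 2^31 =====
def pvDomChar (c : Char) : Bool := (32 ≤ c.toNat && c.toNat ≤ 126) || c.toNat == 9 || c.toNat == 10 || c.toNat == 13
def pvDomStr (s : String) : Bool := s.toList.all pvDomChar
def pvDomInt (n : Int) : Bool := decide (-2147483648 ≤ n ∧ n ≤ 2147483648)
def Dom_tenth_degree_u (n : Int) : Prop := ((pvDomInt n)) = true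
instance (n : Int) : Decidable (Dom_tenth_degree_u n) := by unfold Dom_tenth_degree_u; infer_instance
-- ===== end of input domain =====

-- B replaces A's sign/power/total triple accumulator with Horner's scheme on x = -n (simpler).

-- ===== PORT A =====
-- loop over range(11) with state (total, sign, p)
def tenth_degree_u (n : Int) : Int :=
  let s := (PySem.List.pyRange 0 11 1).foldl
    (fun (st : Int × Int × Int) _ =>
      let (total, sign, p) := st
      (total + sign * p, sign * (-1), p * n))
    (0, 1, 1)
  s.1

-- ===== PORT B =====
-- Horner: result = result * (-n) + 1, 11 times
def tenth_degree_u_alt (n : Int) : Int :=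
  let x := -n
  (PySem.List.pyRange 0 11 1).foldl (fun result _ => result * x + 1) 0

-- ===== PRECONDITION & SPEC =====
def Spec_tenth_degree_u (n : Int) (out : Int) : Prop := out = tenth_degree_u_alt n
instance (n : Int) (out : Int) : Decidable (Spec_tenth_degree_u n out) := by unfold Spec_tenth_degree_u; infer_instance

-- ===== CLAIM (what is proved, stated in full; the proofs are below) =====
def Claim_equal_tenth_degree_u : Prop := ∀ (n : Int), Dom_tenth_degree_u n → Spec_tenth_degree_u n (tenth_degree_u n)

-- ===== LEMMAS AND PROOFS =====

-- ===== VERDICT (by name: the statement is the Claim_ definition above) =====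
theorem tenth_degree_u_spec : Claim_equal_tenth_degree_u := by
  intro n _
  unfold Spec_tenth_degree_u tenth_degree_u tenth_degree_u_alt
  simp [PySem.List.pyRange, List.range_succ]
  ring
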